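-- pv_equiv track=rewrite | github.com/gnsrivastava/rosalind | 1.python_village/find_sub_list.py | array123
-- ===== SOURCE A (Python) =====
-- def array123(nums):
--   pattern = [1,2,3]
--   matches = []
--   for i in range(len(nums)):
--     if nums[i] == pattern[0] and nums[i:i+len(pattern)] == pattern:
--       matches.append(pattern)
--   if len(matches) != 0:
--     return(True)
--   else:
--     return(False)
-- ===== SOURCE B (Python) =====
-- def array123(nums):
--     pos = 0  # number of consecutive pattern elements matched so far
--     for x in nums:
--         if (pos == 0 and x == 1) or (pos == 1 and x == 2):
--             pos += 1
--         elif pos == 2 and x == 3: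
--             return True
--         else:
--             pos = 1 if x == 1 else 0
--     return False
-- ===== Notes on version B (the rewrite author's own statement) =====
-- stated objective: alternative
-- what changed: Replaced A's per-index 3-element slice extraction and list comparison (plus a matches list whose emptiness is tested at the end) by a single-pass state machine that keeps an integer count of consecutive pattern elements matched and returns True as soon as it reaches 3.
import Mathlib
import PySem

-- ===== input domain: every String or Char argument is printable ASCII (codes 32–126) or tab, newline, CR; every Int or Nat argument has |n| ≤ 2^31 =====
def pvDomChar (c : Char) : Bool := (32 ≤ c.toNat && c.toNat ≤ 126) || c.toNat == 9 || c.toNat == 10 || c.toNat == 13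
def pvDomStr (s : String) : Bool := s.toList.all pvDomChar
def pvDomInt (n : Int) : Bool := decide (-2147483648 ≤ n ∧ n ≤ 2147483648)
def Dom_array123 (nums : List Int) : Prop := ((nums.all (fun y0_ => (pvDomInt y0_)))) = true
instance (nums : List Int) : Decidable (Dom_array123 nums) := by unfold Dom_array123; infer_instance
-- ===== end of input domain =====

-- B replaces A's per-index 3-element slice comparison by a single-pass state machine
-- tracking how many consecutive pattern elements are matched (objective: alternative).

-- ===== PORT A =====
def array123 (nums : List Int) : Bool :=
  let pattern : List Int := [1, 2, 3]
  let ms : List (List Int) :=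
    (PySem.List.pyRange 0 (nums.length : Int) 1).foldl
      (fun m i =>
        if PySem.List.pyGet? nums i = PySem.List.pyGet? pattern 0 ∧
           PySem.List.slice nums (some i) (some (i + (pattern.length : Int))) = pattern
        then m ++ [pattern] else m) []
  if ms.length ≠ 0 then true else false

-- ===== PORT B =====
-- the loop of Source B: `pos` = number of consecutive pattern elements matched so far
def altGo : List Int → Int → Bool
  | [], _ => false
  | x :: t, pos =>
    if (pos = 0 ∧ x = 1) ∨ (pos = 1 ∧ x = 2) then altGo t (pos + 1)
    else if pos = 2 ∧ x = 3 then true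
    else altGo t (if x = 1 then 1 else 0)

def array123_alt (nums : List Int) : Bool := altGo nums 0

-- ===== PRECONDITION & SPEC =====
def Spec_array123 (nums : List Int) (out : Bool) : Prop := out = array123_alt nums
instance (nums : List Int) (out : Bool) : Decidable (Spec_array123 nums out) := by unfold Spec_array123; infer_instance

-- ===== CLAIM (what is proved, stated in full; the proofs are below) =====
def Claim_equal_array123 : Prop := ∀ (nums : List Int), Dom_array123 nums → Spec_array123 nums (array123 nums)

-- ===== LEMMAS AND PROOFS =====

-- reference formulation: "[1,2,3] occurs as a window starting at some position"
def has123 : List Int → Bool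
  | [] => false
  | x :: t => decide ((x :: t).take 3 = [1, 2, 3]) || has123 t

lemma has123_iff (l : List Int) :
    has123 l = true ↔ ∃ k : Nat, (l.drop k).take 3 = [1, 2, 3] := by
  induction l with
  | nil => simp [has123]
  | cons x t ih =>
    simp only [has123, Bool.or_eq_true, decide_eq_true_eq, ih]
    constructor
    · rintro (h | ⟨k, hk⟩)
      · exact ⟨0, by simpa using h⟩
      · exact ⟨k + 1, by simpa using hk⟩
    · rintro ⟨k, hk⟩
      cases k with
      | zero => exact Or.inl (by simpa using hk)
      | succ k => exact Or.inr ⟨k, by simpa using hk⟩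

-- A's loop condition at an in-range index reduces to the window equation
lemma A_iff (nums : List Int) :
    array123 nums = true ↔ ∃ k : Nat, (nums.drop k).take 3 = [1, 2, 3] := by
  unfold array123
  dsimp only
  rw [PySem.List.foldl_append_ite
        (p := fun i => PySem.List.pyGet? nums i = PySem.List.pyGet? [(1:Int), 2, 3] 0 ∧
           PySem.List.slice nums (some i) (some (i + ([(1:Int), 2, 3].length : Int))) = [(1:Int), 2, 3])
        (f := fun _ => [(1:Int), 2, 3])]
  simp only [List.nil_append, ne_eq, List.length_eq_zero_iff, List.map_eq_nil_iff,
    List.filter_eq_nil_iff, decide_eq_true_eq]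
  constructor
  · intro h
    split_ifs at h with hc
    · push Not at hc
      obtain ⟨i, hmem, _, hslice⟩ := hc
      rw [PySem.List.mem_pyRange_one] at hmem
      rw [PySem.List.slice_toNat nums (by omega) (by simp; omega)] at hslice
      refine ⟨i.toNat, ?_⟩
      have h3 : (i + ↑([(1:Int), 2, 3].length)).toNat - i.toNat = 3 := by
        simp only [List.length_cons, List.length_nil]; omega
      rwa [h3] at hslice
  · rintro ⟨k, hk⟩
    have hne : nums.drop k ≠ [] := by
      intro hnil; rw [hnil] at hk; simp at hk
    have hklen : k < nums.length := by
      by_contra hge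
      exact hne (List.drop_eq_nil_iff.mpr (by omega))
    rw [if_pos]
    push Not
    refine ⟨(k : Int), ?_, ?_, ?_⟩
    · rw [PySem.List.mem_pyRange_one]
      constructor <;> [positivity; exact_mod_cast hklen]
    · -- nums[k] = 1, from the window equation
      have h0 : (nums.drop k)[0]? = some 1 := by
        rw [← List.getElem?_take_of_lt (show 0 < 3 by omega), hk]; rfl
      simp only [PySem.List.pyGet?_natCast]
      simpa using h0
    · have hcast : ((k : Int) + ↑([(1:Int), 2, 3].length)) = ((k + 3 : Nat) : Int) := by
        simp
      rw [hcast, PySem.List.slice_natCast]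
      simpa using hk

lemma altGo_trio (t : List Int) :
    altGo t 0 = has123 t ∧ altGo t 1 = has123 (1 :: t) ∧ altGo t 2 = has123 (1 :: 2 :: t) := by
  induction t with
  | nil => refine ⟨rfl, by decide, by decide⟩
  | cons x r ih =>
    obtain ⟨h0, h1, h2⟩ := ih
    refine ⟨?_, ?_, ?_⟩ <;>
      by_cases hx1 : x = 1 <;> by_cases hx2 : x = 2 <;> by_cases hx3 : x = 3 <;>
        simp_all [altGo, has123]

lemma B_iff (nums : List Int) :
    array123_alt nums = true ↔ ∃ k : Nat, (nums.drop k).take 3 = [1, 2, 3] := by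
  rw [array123_alt, (altGo_trio nums).1, has123_iff]

-- ===== VERDICT (by name: the statement is the Claim_ definition above) =====
theorem array123_spec : Claim_equal_array123 := by
  intro nums _
  unfold Spec_array123
  cases hb : array123_alt nums with
  | true => exact (A_iff nums).mpr ((B_iff nums).mp hb)
  | false =>
    by_contra h
    have := (B_iff nums).mpr ((A_iff nums).mp (by revert h; cases array123 nums <;> simp))
    simp [hb] at this
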